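-- pv_equiv track=rewrite | github.com/Roha-Lee/Algorithm-Study | BOJ/2613.py | find_supremum
-- ===== SOURCE A (Python) =====
-- def is_valid_upperbound(bids, num_groups, upperbound, partition_elements):
--     if upperbound < max(bids):
--         return False
--     temp_sum = 0
--     group = 1
--     count_bid = 0
--     for bid in bids:
--         if temp_sum + bid <= upperbound:
--             temp_sum += bid
--             count_bid += 1
--         else:
--             group += 1
--             partition_elements.append((count_bid, temp_sum))
--             count_bid = 1
--             temp_sum = bid
--
--     if group <= num_groups:
--         partition_elements.append((count_bid, temp_sum))
--         return True
--     return False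
--
-- def find_supremum(m, bids):
--     left, right = min(bids), sum(bids)
--     supremum = 0
--     best_partition = []
--     while left <= right:
--         mid = (left + right) // 2
--         partition_elements = []
--         if is_valid_upperbound(bids, m, mid, partition_elements):
--             supremum = mid
--             best_partition = partition_elements
--             right = mid - 1
--         else:
--             left = mid + 1
--     return supremum, best_partition
-- ===== SOURCE B (Python) =====
-- def find_supremum(m, bids):
--     mx = max(bids)
--
--     def groups_for(ub):
--         # peel greedy groups off the front: outer loop per group, inner loop extends it
--         out = []
--         i, n = 0, len(bids)
--         while i < n:
--             cnt, s = 1, bids[i]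
--             i += 1
--             while i < n and s + bids[i] <= ub:
--                 s += bids[i]
--                 cnt += 1
--                 i += 1
--             out.append((cnt, s))
--         return out
--
--     def search(lo, hi):
--         # deepest-left success wins, matching the order A's while-loop records bests
--         if lo > hi:
--             return None
--         mid = (lo + hi) // 2
--         if mx <= mid:
--             gs = groups_for(mid)
--             if len(gs) <= m:
--                 deeper = search(lo, mid - 1)
--                 return deeper if deeper is not None else (mid, gs)
--         return search(mid + 1, hi)
--
--     res = search(min(bids), sum(bids))
--     return res if res is not None else (0, [])
-- ===== Notes on version B (the rewrite author's own statement) =====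
-- stated objective: alternative
-- what changed: A's single fold over the bids carrying (sum, group-count, bid-count, partition) state inside a while-loop binary search is replaced by a group-peeling routine (an outer loop per group whose inner loop extends the current group) and a recursive binary search that returns the best feasible probe as an Option, preferring the deeper-left result.
import Mathlib
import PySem

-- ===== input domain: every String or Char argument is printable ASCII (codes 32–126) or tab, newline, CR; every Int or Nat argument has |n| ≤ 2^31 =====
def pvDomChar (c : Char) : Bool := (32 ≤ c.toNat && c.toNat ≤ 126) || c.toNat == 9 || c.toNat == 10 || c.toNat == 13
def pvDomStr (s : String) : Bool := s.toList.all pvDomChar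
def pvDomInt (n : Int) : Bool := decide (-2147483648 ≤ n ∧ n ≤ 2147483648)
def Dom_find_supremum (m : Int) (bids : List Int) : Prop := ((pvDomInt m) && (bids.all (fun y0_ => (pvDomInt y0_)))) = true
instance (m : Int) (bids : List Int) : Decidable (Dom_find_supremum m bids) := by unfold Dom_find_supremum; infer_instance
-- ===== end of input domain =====

-- B replaces A's single fold carrying (sum, group, count, partition) state and its
-- while-loop binary search by a group-peeling routine (an outer loop per group whose
-- inner loop extends it) and a recursive search returning the best probe as an Option;
-- objective: alternative. Return-value equivalence only (neither mutates its arguments).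

-- ===== PORT A =====
-- loop body of is_valid_upperbound: state (temp_sum, group, count_bid, partition_elements)
def ivuStep (upperbound : Int) (st : Int × Int × Int × List (Int × Int)) (bid : Int) :
    Int × Int × Int × List (Int × Int) :=
  if st.1 + bid ≤ upperbound then (st.1 + bid, st.2.1, st.2.2.1 + 1, st.2.2.2)
  else (bid, st.2.1 + 1, 1, st.2.2.2 ++ [(st.2.2.1, st.1)])

-- Python's is_valid_upperbound; the mutated list is returned alongside the bool.
def is_valid_upperbound (bids : List Int) (num_groups upperbound : Int)
    (partition_elements : List (Int × Int)) : Bool × List (Int × Int) :=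
  match PySem.List.max? bids (fun x => x) with
  | none => (false, partition_elements)   -- max([]) raises ValueError; excluded by Pre_
  | some mx =>
    if upperbound < mx then (false, partition_elements)
    else
      let st := bids.foldl (ivuStep upperbound) (0, 1, 0, partition_elements)
      if st.2.1 ≤ num_groups then (true, st.2.2.2 ++ [(st.2.2.1, st.1)])
      else (false, st.2.2.2)

-- the while-loop of A's find_supremum; state (supremum, best_partition)
def loopA (bids : List Int) (m left right supremum : Int) (best : List (Int × Int)) :
    Int × List (Int × Int) :=
  if h : left ≤ right then
    let mid := PySem.Int.floordiv (left + right) 2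
    let pe := is_valid_upperbound bids m mid []
    if pe.1 then loopA bids m left (mid - 1) mid pe.2
    else loopA bids m (mid + 1) right supremum best
  else (supremum, best)
termination_by (right - left + 1).toNat
decreasing_by
  · have := PySem.Int.floordiv_two_mid_bounds (lo := left) (hi := right) h; omega
  · have := PySem.Int.floordiv_two_mid_bounds (lo := left) (hi := right) h; omega

def find_supremum (m : Int) (bids : List Int) : Int × (List (Int × Int)) :=
  match PySem.List.min? bids (fun x => x) with
  | none => (0, [])   -- min([]) raises ValueError; excluded by Pre_
  | some mn => loopA bids m mn bids.sum 0 []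

-- ===== PORT B =====
-- inner while-loop of B's groups_for: extend the current group while the next bid fits
def peelB (ub : Int) (cnt s : Int) (rest : List Int) : Int × Int × List Int :=
  match rest with
  | [] => (cnt, s, [])
  | b :: t => if s + b ≤ ub then peelB ub (cnt + 1) (s + b) t else (cnt, s, b :: t)

theorem peelB_rest_le (ub : Int) : ∀ (rest : List Int) (cnt s : Int),
    (peelB ub cnt s rest).2.2.length ≤ rest.length := by
  intro rest
  induction rest with
  | nil => intro cnt s; simp [peelB]
  | cons b t ih =>
    intro cnt s
    by_cases h : s + b ≤ ub
    · simp only [peelB, h, if_pos]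
      have := ih (cnt + 1) (s + b); simp; omega
    · simp [peelB, h]

-- outer while-loop of B's groups_for: peel one greedy group off the front per step
def groupsB (ub : Int) : List Int → List (Int × Int)
  | [] => []
  | b :: t =>
    ((peelB ub 1 b t).1, (peelB ub 1 b t).2.1) :: groupsB ub (peelB ub 1 b t).2.2
termination_by l => l.length
decreasing_by
  have := peelB_rest_le ub t 1 b; simp; omega

-- B's recursive search: deepest-left feasible probe wins, else this probe's (mid, gs)
def searchB (bids : List Int) (m mx lo hi : Int) : Option (Int × List (Int × Int)) :=
  if h : lo ≤ hi then
    let mid := PySem.Int.floordiv (lo + hi) 2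
    if mx ≤ mid then
      let gs := groupsB mid bids
      if (gs.length : Int) ≤ m then
        match searchB bids m mx lo (mid - 1) with
        | some r => some r
        | none => some (mid, gs)
      else searchB bids m mx (mid + 1) hi
    else searchB bids m mx (mid + 1) hi
  else none
termination_by (hi - lo + 1).toNat
decreasing_by
  · have := PySem.Int.floordiv_two_mid_bounds (lo := lo) (hi := hi) h; omega
  · have := PySem.Int.floordiv_two_mid_bounds (lo := lo) (hi := hi) h; omega
  · have := PySem.Int.floordiv_two_mid_bounds (lo := lo) (hi := hi) h; omega

def find_supremum_alt (m : Int) (bids : List Int) : Int × (List (Int × Int)) :=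
  match PySem.List.max? bids (fun x => x) with
  | none => (0, [])   -- max([]) raises ValueError; excluded by Pre_
  | some mx =>
    match PySem.List.min? bids (fun x => x) with
    | none => (0, [])
    | some mn =>
      match searchB bids m mx mn bids.sum with
      | none => (0, [])
      | some res => res

-- ===== PRECONDITION & SPEC =====
-- Pre_ excludes only the empty list, on which Python's min()/max() raise ValueError.
def Pre_find_supremum (_m : Int) (bids : List Int) : Prop := bids ≠ []
instance (m : Int) (bids : List Int) : Decidable (Pre_find_supremum m bids) := by unfold Pre_find_supremum; infer_instance
def pvWitness_find_supremum : Int × List Int := (2, [1, 2, 3])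

def Spec_find_supremum (m : Int) (bids : List Int) (out : Int × (List (Int × Int))) : Prop := out = find_supremum_alt m bids
instance (m : Int) (bids : List Int) (out : Int × (List (Int × Int))) : Decidable (Spec_find_supremum m bids out) := by unfold Spec_find_supremum; infer_instance

-- ===== CLAIM (what is proved, stated in full; the proofs are below) =====
def Claim_equal_find_supremum : Prop := ∀ (m : Int) (bids : List Int), Dom_find_supremum m bids → Pre_find_supremum m bids → Spec_find_supremum m bids (find_supremum m bids)

-- ===== LEMMAS AND PROOFS =====

-- A's fold, run from a mid-group state, first plays out B's inner (peel) loop.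
theorem fold_peel (ub : Int) : ∀ (rest : List Int) (ts cb g : Int) (parts : List (Int × Int)),
    rest.foldl (ivuStep ub) (ts, g, cb, parts) =
      (match peelB ub cb ts rest with
       | (cnt, s, []) => (s, g, cnt, parts)
       | (cnt, s, b' :: t') => t'.foldl (ivuStep ub) (b', g + 1, 1, parts ++ [(cnt, s)])) := by
  intro rest
  induction rest with
  | nil => intro ts cb g parts; simp [peelB]
  | cons b t ih =>
    intro ts cb g parts
    by_cases h : ts + b ≤ ub
    · simp only [List.foldl, ivuStep, h, if_pos, peelB]
      exact ih (ts + b) (cb + 1) g parts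
    · simp [List.foldl, ivuStep, h, peelB]

-- A's fold from a mid-group state produces exactly B's peeled groups.
theorem fold_groups (ub : Int) : ∀ (n : Nat) (rest : List Int), rest.length ≤ n →
    ∀ (ts cb g : Int) (parts : List (Int × Int)),
    rest.foldl (ivuStep ub) (ts, g, cb, parts) =
      (let gs := ((peelB ub cb ts rest).1, (peelB ub cb ts rest).2.1) ::
                  groupsB ub (peelB ub cb ts rest).2.2
       ((gs.getLastD (0, 0)).2, g + gs.length - 1, (gs.getLastD (0, 0)).1, parts ++ gs.dropLast)) := by
  intro n
  induction n with
  | zero =>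
    intro rest hlen ts cb g parts
    have : rest = [] := by cases rest <;> simp_all
    subst this
    simp [peelB, groupsB]
  | succ n ih =>
    intro rest hlen ts cb g parts
    rw [fold_peel]
    cases hp : peelB ub cb ts rest with
    | mk cnt rest2 =>
      cases rest2 with
      | mk s r =>
        cases r with
        | nil => simp [groupsB]
        | cons b' t' =>
          simp only
          have hlt : t'.length ≤ n := by
            have h1 := peelB_rest_le ub rest cb ts
            rw [hp] at h1; simp at h1; omega
          rw [ih t' hlt b' 1 (g + 1) (parts ++ [(cnt, s)])]
          rw [groupsB]
          simp only [List.getLastD_cons]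
          rw [List.dropLast_cons₂, List.append_assoc]
          refine Prod.ext rfl (Prod.ext ?_ (Prod.ext rfl rfl))
          simp only [List.length_cons]
          push_cast
          ring

theorem dropLast_append_getLastD {α : Type} (x : α) (l : List α) (d : α) :
    (x :: l).dropLast ++ [(x :: l).getLastD d] = x :: l := by
  induction l generalizing x d with
  | nil => simp
  | cons y ys ih => rw [List.dropLast_cons₂, List.getLastD_cons]; simpa using ih y x

-- A's fold over the whole list computes exactly B's groups (last one still open)
theorem ivu_fold_eq (bids : List Int) (ub mx : Int)
    (hmx : PySem.List.max? bids (fun x => x) = some mx) (hub : mx ≤ ub) :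
    bids.foldl (ivuStep ub) (0, 1, 0, []) =
      (((groupsB ub bids).getLastD (0, 0)).2, ((groupsB ub bids).length : Int),
       ((groupsB ub bids).getLastD (0, 0)).1, (groupsB ub bids).dropLast) := by
  cases bids with
  | nil => exact absurd hmx (by simp [Iff.mpr (PySem.List.max?_eq_none_iff [] (fun x => x)) rfl])
  | cons b0 t =>
    have hb0 : b0 ≤ mx := PySem.List.max?_isMax hmx b0 (List.mem_cons_self ..)
    have h0 : (0 : Int) + b0 ≤ ub := by omega
    rw [List.foldl_cons]
    have hstep : ivuStep ub (0, 1, 0, []) b0 = (b0, 1, 1, []) := by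
      simp [ivuStep]
      omega
    rw [hstep, fold_groups ub t.length t le_rfl b0 1 1 []]
    rw [groupsB]
    simp only [List.length_cons]
    refine Prod.ext rfl (Prod.ext ?_ (Prod.ext rfl rfl))
    push_cast; ring

theorem valid_true (bids : List Int) (m ub mx : Int)
    (hmx : PySem.List.max? bids (fun x => x) = some mx) (hub : mx ≤ ub)
    (hm : ((groupsB ub bids).length : Int) ≤ m) :
    is_valid_upperbound bids m ub [] = (true, groupsB ub bids) := by
  unfold is_valid_upperbound
  rw [hmx]
  dsimp only
  rw [if_neg (not_lt.mpr hub)]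
  rw [ivu_fold_eq bids ub mx hmx hub]
  simp only
  rw [if_pos hm]
  cases hg : groupsB ub bids with
  | nil =>
    exfalso
    cases bids with
    | nil => exact absurd hmx (by simp [Iff.mpr (PySem.List.max?_eq_none_iff [] (fun x => x)) rfl])
    | cons b0 t => rw [groupsB] at hg; exact List.cons_ne_nil _ _ hg
  | cons y ys =>
    rw [← hg]
    have : ((((groupsB ub bids).getLastD (0, 0)).1, ((groupsB ub bids).getLastD (0, 0)).2))
        = (groupsB ub bids).getLastD (0, 0) := rfl
    rw [this, hg, dropLast_append_getLastD]

theorem valid_false (bids : List Int) (m ub mx : Int)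
    (hmx : PySem.List.max? bids (fun x => x) = some mx)
    (h : ¬ (mx ≤ ub ∧ ((groupsB ub bids).length : Int) ≤ m)) :
    (is_valid_upperbound bids m ub []).1 = false := by
  unfold is_valid_upperbound
  rw [hmx]
  dsimp only
  by_cases hub : mx ≤ ub
  · rw [if_neg (not_lt.mpr hub)]
    rw [ivu_fold_eq bids ub mx hmx hub]
    simp only
    rw [if_neg (fun hm => h ⟨hub, hm⟩)]
  · rw [if_pos (lt_of_not_ge hub)]

-- the two searches agree: loopA with current best (s, p) equals searchB with fallback (s, p)
theorem loop_eq (bids : List Int) (m mx : Int)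
    (hmx : PySem.List.max? bids (fun x => x) = some mx) :
    ∀ (n : Nat) (l r s : Int) (p : List (Int × Int)), (r - l + 1).toNat ≤ n →
    loopA bids m l r s p =
      (match searchB bids m mx l r with
       | none => (s, p)
       | some res => res) := by
  intro n
  induction n with
  | zero =>
    intro l r s p hle
    have hlr : ¬ l ≤ r := by omega
    rw [loopA, searchB]
    simp [hlr]
  | succ n ih =>
    intro l r s p hle
    by_cases hlr : l ≤ r
    · have hmid := PySem.Int.floordiv_two_mid_bounds (lo := l) (hi := r) hlr
      rw [loopA, searchB]
      simp only [hlr, dif_pos]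
      by_cases hub : mx ≤ PySem.Int.floordiv (l + r) 2
      · by_cases hm : (((groupsB (PySem.Int.floordiv (l + r) 2) bids).length : Int) ≤ m)
        · rw [valid_true bids m _ mx hmx hub hm]
          simp only [if_pos hub, if_pos hm]
          rw [ih l (PySem.Int.floordiv (l + r) 2 - 1) _ _ (by omega)]
          cases searchB bids m mx l (PySem.Int.floordiv (l + r) 2 - 1) <;> simp
        · rw [valid_false bids m _ mx hmx (fun hc => hm hc.2)]
          simp only [Bool.false_eq_true, if_false, if_pos hub, if_neg hm]
          exact ih (PySem.Int.floordiv (l + r) 2 + 1) r s p (by omega)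
      · rw [valid_false bids m _ mx hmx (fun hc => hub hc.1)]
        simp only [Bool.false_eq_true, if_false, if_neg hub]
        exact ih (PySem.Int.floordiv (l + r) 2 + 1) r s p (by omega)
    · rw [loopA, searchB]
      simp [hlr]

-- ===== VERDICT (by name: the statement is the Claim_ definition above) =====
theorem find_supremum_spec : Claim_equal_find_supremum := by
  intro m bids _ hpre
  unfold Spec_find_supremum find_supremum find_supremum_alt
  cases hmx : PySem.List.max? bids (fun x => x) with
  | none => exact absurd (Iff.mp (PySem.List.max?_eq_none_iff bids (fun x => x)) hmx) hpre
  | some mx =>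
    cases hmn : PySem.List.min? bids (fun x => x) with
    | none => exact absurd (Iff.mp (PySem.List.min?_eq_none_iff bids (fun x => x)) hmn) hpre
    | some mn =>
      dsimp only
      rw [loop_eq bids m mx hmx (bids.sum - mn + 1).toNat mn bids.sum 0 [] le_rfl]
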